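-- pv_equiv track=rewrite | github.com/Pujithakallu/LeetcodeSolutions | solutions/problem_1834_single_threaded_cpu/solution.py | getOrder
-- ===== SOURCE A (Python) =====
-- from typing import List
--
-- def getOrder(tasks: List[List[int]]) -> List[int]:
--     # Heap/Priority Queue - O(n log k) time
--     import heapq
--     if not tasks:
--         return []
--     # Min heap (negate for max heap)
--     heap = []
--     for val in tasks:
--         heapq.heappush(heap, val)
--         if len(heap) > (tasks if isinstance(tasks, int) else len(tasks)):
--             heapq.heappop(heap)
--     return heap[0] if heap else []
-- ===== SOURCE B (Python) =====
-- def getOrder(tasks):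
--     # A's heap is never popped, so heap[0] is just the lexicographic minimum.
--     return min(tasks) if tasks else []
-- ===== Notes on version B (the rewrite author's own statement) =====
-- stated objective: simpler
-- what changed: A pushes every task onto a heap it never pops and returns heap[0]; B returns min(tasks) directly via a single linear scan.
import Mathlib
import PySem

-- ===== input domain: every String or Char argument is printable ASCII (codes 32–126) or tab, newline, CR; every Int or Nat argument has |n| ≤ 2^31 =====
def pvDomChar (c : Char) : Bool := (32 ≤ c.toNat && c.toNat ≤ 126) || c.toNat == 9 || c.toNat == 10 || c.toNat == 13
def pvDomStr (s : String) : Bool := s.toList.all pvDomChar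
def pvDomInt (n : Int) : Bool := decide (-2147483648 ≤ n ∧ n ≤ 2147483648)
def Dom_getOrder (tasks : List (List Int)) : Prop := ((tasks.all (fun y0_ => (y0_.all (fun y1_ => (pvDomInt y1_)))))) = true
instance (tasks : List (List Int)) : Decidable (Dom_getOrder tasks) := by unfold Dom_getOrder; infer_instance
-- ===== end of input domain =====

-- B replaces A's heap construction (push all tasks; the pop branch is dead, so heap[0] is
-- the lexicographic minimum) with a single linear min scan; objective: simpler.

-- ===== PORT A =====
-- Python's `<` on two lists of ints: lexicographic, a strict prefix is smaller (exact).
def pyListLt : List Int → List Int → Bool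
  | _, [] => false
  | [], _ :: _ => true
  | a :: as, b :: bs => if a < b then true else if b < a then false else pyListLt as bs

-- heapq._siftdown(heap, startpos, pos): climb towards the root while newitem < parent
-- (CPython's loop, with parentpos = (pos-1)>>1 and parent = heap[parentpos] inlined).
def siftdownLoop (heap : List (List Int)) (startpos pos : Nat) (newitem : List Int) :
    List (List Int) :=
  if _h : startpos < pos then
    if pyListLt newitem (heap.getD ((pos - 1) / 2) []) then
      siftdownLoop (heap.set pos (heap.getD ((pos - 1) / 2) [])) startpos ((pos - 1) / 2) newitem
    else heap.set pos newitem
  else heap.set pos newitem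
  termination_by pos
  decreasing_by
    have := Nat.div_le_self (pos - 1) 2
    omega

-- heapq.heappush: append then sift down from the last index.
def heappush (heap : List (List Int)) (item : List Int) : List (List Int) :=
  siftdownLoop (heap ++ [item]) 0 heap.length item

-- heapq._siftup(heap, pos) inner loop (the child-selection `if` is unfolded into the two
-- recursive calls; only reachable from A's dead pop branch).
def siftupLoop (heap : List (List Int)) (endpos startpos pos childpos : Nat)
    (newitem : List Int) : List (List Int) :=
  if _h : childpos < endpos then
    if childpos + 1 < endpos ∧
        ¬ (pyListLt (heap.getD childpos []) (heap.getD (childpos + 1) []) = true) then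
      siftupLoop (heap.set pos (heap.getD (childpos + 1) [])) endpos startpos (childpos + 1)
        (2 * (childpos + 1) + 1) newitem
    else
      siftupLoop (heap.set pos (heap.getD childpos [])) endpos startpos childpos
        (2 * childpos + 1) newitem
  else
    siftdownLoop (heap.set pos newitem) startpos pos newitem
  termination_by endpos - childpos
  decreasing_by
    · omega
    · omega

-- heapq.heappop: returns (popped item, remaining heap).  A discards the popped item.
def heappop (heap : List (List Int)) : List Int × List (List Int) :=
  let lastelt := (heap.getLast?).getD []
  let heap := heap.dropLast
  if heap ≠ [] then
    (heap.getD 0 [], siftupLoop (heap.set 0 lastelt) heap.length 0 0 1 lastelt)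
  else (lastelt, heap)

-- Port of A.  `(tasks if isinstance(tasks, int) else len(tasks))` is always `len(tasks)`
-- because `tasks` is a list, so it is ported as `tasks.length`.
def getOrder (tasks : List (List Int)) : List Int :=
  if tasks = [] then []
  else
    let heap := tasks.foldl (fun heap val =>
      if (heappush heap val).length > tasks.length then (heappop (heappush heap val)).2
      else heappush heap val) []
    if heap ≠ [] then heap.getD 0 [] else []

-- ===== PORT B =====
-- Python `min` over a nonempty list of int lists, ported by hand (first minimum kept;
-- exact: `min` replaces the running minimum only on a strict `<`).
def getOrder_alt (tasks : List (List Int)) : List Int :=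
  match tasks with
  | [] => []
  | t :: ts => ts.foldl (fun m v => if pyListLt v m then v else m) t

-- ===== PRECONDITION & SPEC =====
def Spec_getOrder (tasks : List (List Int)) (out : List Int) : Prop := out = getOrder_alt tasks
instance (tasks : List (List Int)) (out : List Int) : Decidable (Spec_getOrder tasks out) := by unfold Spec_getOrder; infer_instance

-- ===== CLAIM (what is proved, stated in full; the proofs are below) =====
def Claim_equal_getOrder : Prop := ∀ (tasks : List (List Int)), Dom_getOrder tasks → Spec_getOrder tasks (getOrder tasks)

-- ===== LEMMAS AND PROOFS =====

theorem pyListLt_irrefl : ∀ a : List Int, pyListLt a a = false := by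
  intro a
  induction a with
  | nil => rfl
  | cons x xs ih => simp [pyListLt, ih]

theorem pyListLt_trans : ∀ a b c : List Int,
    pyListLt a b = true → pyListLt b c = true → pyListLt a c = true := by
  intro a
  induction a with
  | nil =>
    intro b c hab hbc
    cases b with
    | nil => simp [pyListLt] at hab
    | cons y ys =>
      cases c with
      | nil => simp [pyListLt] at hbc
      | cons z zs => simp [pyListLt]
  | cons x xs ih =>
    intro b c hab hbc
    cases b with
    | nil => simp [pyListLt] at hab
    | cons y ys =>
      cases c with
      | nil => simp [pyListLt] at hbc
      | cons z zs =>
        simp only [pyListLt] at hab hbc ⊢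
        rcases lt_trichotomy x y with hxy | hxy | hxy
        · rcases lt_trichotomy y z with hyz | hyz | hyz
          · simp [show x < z from hxy.trans hyz]
          · subst hyz
            simp [hxy]
          · simp [show ¬ y < z by omega, hyz] at hbc
        · subst hxy
          simp only [lt_irrefl, if_false] at hab
          rcases lt_trichotomy x z with hxz | hxz | hxz
          · simp [hxz]
          · subst hxz
            simp only [lt_irrefl, if_false] at hbc ⊢
            exact ih ys zs hab hbc
          · simp [show ¬ x < z by omega, hxz] at hbc
        · simp [show ¬ x < y by omega, hxy] at hab

theorem pyListLt_lt_of_lt_of_nlt : ∀ a b c : List Int,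
    pyListLt a b = true → pyListLt c b = false → pyListLt a c = true := by
  intro a
  induction a with
  | nil =>
    intro b c hab hcb
    cases b with
    | nil => simp [pyListLt] at hab
    | cons y ys =>
      cases c with
      | nil => simp [pyListLt] at hcb
      | cons z zs => simp [pyListLt]
  | cons x xs ih =>
    intro b c hab hcb
    cases b with
    | nil => simp [pyListLt] at hab
    | cons y ys =>
      cases c with
      | nil => simp [pyListLt] at hcb
      | cons z zs =>
        simp only [pyListLt] at hab hcb ⊢
        rcases lt_trichotomy z y with hzy | hzy | hzy
        · simp [hzy] at hcb
        · subst hzy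
          simp only [lt_irrefl, if_false] at hcb
          rcases lt_trichotomy x z with hxz | hxz | hxz
          · simp [hxz]
          · subst hxz
            simp only [lt_irrefl, if_false] at hab ⊢
            exact ih ys zs hab hcb
          · simp [show ¬ x < z by omega, hxz] at hab
        · rcases lt_trichotomy x y with hxy | hxy | hxy
          · simp [show x < z by omega]
          · subst hxy
            simp [show x < z by omega]
          · simp [show ¬ x < y by omega, hxy] at hab

theorem siftdownLoop_length (pos : Nat) : ∀ (heap : List (List Int)) (x : List Int),
    (siftdownLoop heap 0 pos x).length = heap.length := by
  induction pos using Nat.strong_induction_on with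
  | _ pos ih =>
    intro heap x
    rw [siftdownLoop]
    split
    · split
      · rw [ih _ (by have := Nat.div_le_self (pos - 1) 2; omega)]
        simp
      · simp
    · simp

theorem siftdownLoop_mem (pos : Nat) : ∀ (heap : List (List Int)) (x : List Int),
    pos < heap.length → ∀ v ∈ siftdownLoop heap 0 pos x, v ∈ heap ∨ v = x := by
  induction pos using Nat.strong_induction_on with
  | _ pos ih =>
    intro heap x hpos v hv
    rw [siftdownLoop] at hv
    split at hv
    · rename_i hgt
      split at hv
      · have hpp : (pos - 1) / 2 < pos := by have := Nat.div_le_self (pos - 1) 2; omega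
        have := ih _ hpp (heap.set pos (heap.getD ((pos - 1) / 2) [])) x
          (by simp only [List.length_set]; omega) v hv
        rcases this with h | h
        · rcases List.mem_or_eq_of_mem_set h with h' | h'
          · exact Or.inl h'
          · left
            rw [h', List.getD_eq_getElem _ _ (by omega)]
            exact List.getElem_mem _
        · exact Or.inr h
      · rcases List.mem_or_eq_of_mem_set hv with h | h
        · exact Or.inl h
        · exact Or.inr h
    · rcases List.mem_or_eq_of_mem_set hv with h | h
      · exact Or.inl h
      · exact Or.inr h

theorem siftdownLoop_head_lt (pos : Nat) : ∀ (heap : List (List Int)) (x h0 : List Int),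
    pos < heap.length → pyListLt x h0 = true →
    (∀ i, i < pos → pyListLt (heap.getD i []) h0 = false) →
    (siftdownLoop heap 0 pos x).getD 0 [] = x := by
  induction pos using Nat.strong_induction_on with
  | _ pos ih =>
    intro heap x h0 hpos hx hall
    rw [siftdownLoop]
    split
    · rename_i hgt
      have hpp : (pos - 1) / 2 < pos := by have := Nat.div_le_self (pos - 1) 2; omega
      have hparent : pyListLt (heap.getD ((pos - 1) / 2) []) h0 = false := hall _ hpp
      rw [if_pos (pyListLt_lt_of_lt_of_nlt _ _ _ hx hparent)]
      refine ih _ hpp _ x h0 (by simp only [List.length_set]; omega) hx ?_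
      intro i hi
      rw [List.getD_eq_getElem _ _ (by simp; omega),
        List.getElem_set_ne (by omega), ← List.getD_eq_getElem _ ([] : List Int) (by omega)]
      exact hall i (by omega)
    · rename_i hgt
      have hpos0 : pos = 0 := by omega
      subst hpos0
      rw [List.getD_eq_getElem _ _ (by simpa using hpos)]
      simp [List.getElem_set_self]
  
theorem siftdownLoop_head_ge (pos : Nat) : ∀ (heap : List (List Int)) (x : List Int),
    0 < pos → pyListLt x (heap.getD 0 []) = false →
    (siftdownLoop heap 0 pos x).getD 0 [] = heap.getD 0 [] := by
  induction pos using Nat.strong_induction_on with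
  | _ pos ih =>
    intro heap x hpos hx
    rw [siftdownLoop, dif_pos hpos]
    by_cases hpp0 : (pos - 1) / 2 = 0
    · rw [hpp0, if_neg (by simp; exact hx)]
      simp only [List.getD]
      rw [List.getElem?_set_ne (by omega)]
    · have hpp : (pos - 1) / 2 < pos := by have := Nat.div_le_self (pos - 1) 2; omega
      split
      · rw [ih _ hpp _ x (by omega)
          (by
            simp only [List.getD]
            rw [List.getElem?_set_ne (by omega)]
            exact hx)]
        simp only [List.getD]
        rw [List.getElem?_set_ne (by omega)]
      · simp only [List.getD]
        rw [List.getElem?_set_ne (by omega)]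

-- root-minimality: no element of the heap is strictly below the value m.
def RootMin (m : List Int) (h : List (List Int)) : Prop :=
  ∀ v ∈ h, pyListLt v m = false

theorem heappush_length (h : List (List Int)) (x : List Int) :
    (heappush h x).length = h.length + 1 := by
  unfold heappush
  rw [siftdownLoop_length]
  simp

theorem heappush_mem (h : List (List Int)) (x : List Int) :
    ∀ v ∈ heappush h x, v ∈ h ∨ v = x := by
  intro v hv
  rcases siftdownLoop_mem h.length (h ++ [x]) x (by simp) v hv with h' | h'
  · rcases List.mem_append.mp h' with h'' | h''
    · exact Or.inl h''
    · simp at h''; exact Or.inr h''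
  · exact Or.inr h'

theorem heappush_head (h : List (List Int)) (x m : List Int)
    (hne : h ≠ []) (hm : h.getD 0 [] = m) (hroot : RootMin m h) :
    (heappush h x).getD 0 [] = if pyListLt x m then x else m := by
  have hlen : 0 < h.length := List.length_pos_iff.mpr hne
  unfold heappush
  by_cases hlt : pyListLt x m = true
  · rw [if_pos hlt]
    refine siftdownLoop_head_lt h.length (h ++ [x]) x m (by simp) hlt ?_
    intro i hi
    rw [List.getD_eq_getElem _ _ (by simp; omega), List.getElem_append_left hi,
      ← List.getD_eq_getElem _ ([] : List Int) hi]
    exact hroot _ (by rw [List.getD_eq_getElem _ _ hi]; exact List.getElem_mem _)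
  · rw [if_neg (by simp [hlt])]
    have h0 : (h ++ [x]).getD 0 [] = m := by
      rw [List.getD_eq_getElem _ _ (by simp only [List.length_append]; omega), List.getElem_append_left hlen,
        ← List.getD_eq_getElem _ ([] : List Int) hlen, hm]
    have hx' : pyListLt x ((h ++ [x]).getD 0 []) = false := by
      rw [h0]
      exact eq_false_of_ne_true hlt
    rw [siftdownLoop_head_ge h.length (h ++ [x]) x hlen hx', h0]

theorem heappush_rootmin (h : List (List Int)) (x m : List Int)
    (hroot : RootMin m h) :
    RootMin (if pyListLt x m then x else m) (heappush h x) := by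
  intro v hv
  rcases heappush_mem h x v hv with hvh | hvx
  · split
    · rename_i hlt
      by_cases hvx' : pyListLt v x = true
      · have := pyListLt_trans v x m hvx' hlt
        rw [hroot v hvh] at this
        exact absurd this (by simp)
      · simpa using hvx'
    · exact hroot v hvh
  · subst hvx
    split
    · exact pyListLt_irrefl v
    · rename_i hlt
      simpa using hlt

-- the fold in A never triggers the pop branch and its heap head tracks the running minimum.
theorem fold_invariant (n : Nat) : ∀ (rem : List (List Int)) (h : List (List Int)) (m : List Int),
    h ≠ [] → h.getD 0 [] = m → RootMin m h → h.length + rem.length ≤ n →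
    (rem.foldl (fun heap val =>
        if (heappush heap val).length > n then (heappop (heappush heap val)).2
        else heappush heap val) h) ≠ [] ∧
    (rem.foldl (fun heap val =>
        if (heappush heap val).length > n then (heappop (heappush heap val)).2
        else heappush heap val) h).getD 0 []
      = rem.foldl (fun m v => if pyListLt v m then v else m) m := by
  intro rem
  induction rem with
  | nil =>
    intro h m hne hm _ _
    exact ⟨hne, hm⟩
  | cons v rem ih =>
    intro h m hne hm hroot hlen
    simp only [List.foldl_cons]
    have hlen' : (heappush h v).length = h.length + 1 := heappush_length h v
    rw [if_neg (by simp at hlen ⊢; omega)]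
    refine ih (heappush h v) (if pyListLt v m then v else m) ?_
      (heappush_head h v m hne hm hroot) (heappush_rootmin h v m hroot)
      (by simp at hlen ⊢; omega)
    intro hc
    rw [hc] at hlen'
    simp at hlen'

theorem fold_first (t : List Int) (ts : List (List Int)) :
    List.foldl (fun heap val =>
        if (heappush heap val).length > (t :: ts).length then (heappop (heappush heap val)).2
        else heappush heap val) [] (t :: ts)
      = List.foldl (fun heap val =>
        if (heappush heap val).length > (t :: ts).length then (heappop (heappush heap val)).2
        else heappush heap val) [t] ts := by
  simp only [List.foldl_cons]
  congr 1
  have hstep1 : heappush [] t = [t] := by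
    unfold heappush siftdownLoop
    simp
  rw [hstep1]
  simp

-- ===== VERDICT (by name: the statement is the Claim_ definition above) =====
theorem getOrder_spec : Claim_equal_getOrder := by
  intro tasks _
  unfold Spec_getOrder getOrder getOrder_alt
  cases tasks with
  | nil => simp
  | cons t ts =>
    rw [if_neg (by simp : ¬ (t :: ts = []))]
    rw [fold_first]
    have := fold_invariant (t :: ts).length ts [t] t (by simp) (by simp [List.getD])
      (by
        intro v hv
        simp at hv
        subst hv
        exact pyListLt_irrefl v)
      (by simp; omega)
    rw [if_pos this.1]
    exact this.2
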